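-- pv_equiv track=rewrite | github.com/EdgarRomero290/CodeWars | Mountain Bike Trail(Not Ready).py | draw_trail
-- ===== SOURCE A (Python) =====
-- from itertools import accumulate
-- from itertools import accumulate
--
-- TILES = "_-‾"
--
-- def draw_trail(trail):
--     hs    = [*accumulate(trail)]
--     min_h = min(hs)
--     base  = min_h - min_h%3
--     but   = min_h//3
--     up    = max(hs)//3
--
--     H     = up-but+3
--     blank = ' ' * (len(trail)+1)
--     board = [list(blank) for _ in range(H)]
--
--     for j,h in enumerate(hs):
--         i = H-1 - (h-base)//3
--         board[i][j] = board[i-2][j+1] = TILES[h%3]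
--
--     return '\n'.join(map(''.join,board))
-- ===== SOURCE B (Python) =====
-- from itertools import accumulate
--
-- TILES = "_-‾"
--
-- def draw_trail(trail):
--     hs = list(accumulate(trail))
--     min_h = min(hs)
--     base = min_h - min_h % 3
--     H = max(hs)//3 - min_h//3 + 3
--     n = len(hs)
--
--     # gather: no canvas is ever allocated or mutated.  Per column, compute
--     # its tile row and tile character once; ...
--     row_ = [H - 1 - (h - base)//3 for h in hs]
--     til_ = [TILES[h % 3] for h in hs]
--
--     # ... then every output character is looked up directly: cell (r,c)
--     # shows column c's own tile when its row hits r (the later, winning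
--     # write of A), else column c-1's lifted tile, else space.
--     def cell(r, c):
--         if c < n and row_[c] == r:
--             return til_[c]
--         if c >= 1 and row_[c-1] == r + 2:
--             return til_[c-1]
--         return ' '
--
--     return '\n'.join(''.join(cell(r, c) for c in range(n + 1)) for r in range(H))
-- ===== Notes on version B (the rewrite author's own statement) =====
-- stated objective: alternative
-- what changed: A scatters: it allocates an H x W blank grid and, for each column, destructively writes the two tile cells before joining the rows; B gathers: it never builds or mutates any canvas, instead it precomputes each column's tile row and tile character once and then computes every output character directly by a closed per-cell rule (column c's own tile if its row index is r, else column c-1's lifted tile, else space), emitting the picture row by row.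
import Mathlib
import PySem

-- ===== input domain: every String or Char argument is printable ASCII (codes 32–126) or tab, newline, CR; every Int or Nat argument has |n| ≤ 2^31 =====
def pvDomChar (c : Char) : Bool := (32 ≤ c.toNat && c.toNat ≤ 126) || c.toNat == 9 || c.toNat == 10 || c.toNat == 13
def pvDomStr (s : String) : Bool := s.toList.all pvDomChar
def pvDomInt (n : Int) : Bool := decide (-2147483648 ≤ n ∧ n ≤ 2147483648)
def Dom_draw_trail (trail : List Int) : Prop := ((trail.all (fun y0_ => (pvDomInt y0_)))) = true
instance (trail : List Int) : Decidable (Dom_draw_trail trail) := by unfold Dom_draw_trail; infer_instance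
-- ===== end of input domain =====

-- B computes every output character directly from the heights by a closed per-cell rule (gather),
-- instead of A's allocate-a-blank-grid-and-scatter-writes-then-join; same output, alternative algorithm.

-- ===== PORT A =====
-- TILES = "_-‾"
def pvTiles : List Char := ['_', '-', '‾']

-- [*accumulate(trail)]  (running partial sums; hand port, exact)
def pvAccum (cur : Int) : List Int → List Int
  | [] => []
  | x :: xs => (cur + x) :: pvAccum (cur + x) xs

-- i = H-1 - (h-base)//3   and   TILES[h%3]
def pvIdx (H base h : Int) : Int := H - 1 - PySem.Int.floordiv (h - base) 3
def pvTile (h : Int) : Char := PySem.List.pyGetD pvTiles (PySem.Int.mod h 3) ' '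

-- loop body of A: board[i][j] = board[i-2][j+1] = TILES[h%3]
def pvStepA (H base : Int) (board : List (List Char)) (jh : Int × Int) : List (List Char) :=
  let i := pvIdx H base jh.2
  let t := pvTile jh.2
  let b1 := PySem.List.pySetD board i (PySem.List.pySetD (PySem.List.pyGetD board i []) jh.1 t)
  PySem.List.pySetD b1 (i - 2) (PySem.List.pySetD (PySem.List.pyGetD b1 (i - 2) []) (jh.1 + 1) t)

def draw_trail (trail : List Int) : String :=
  let hs := pvAccum 0 trail
  let min_h := (PySem.List.min? hs (fun x => x)).getD 0
  let base := min_h - PySem.Int.mod min_h 3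
  let but := PySem.Int.floordiv min_h 3
  let up := PySem.Int.floordiv ((PySem.List.max? hs (fun x => x)).getD 0) 3
  let H := up - but + 3
  let blank := List.replicate (trail.length + 1) ' '
  let board0 := (PySem.List.pyRange 0 H 1).map (fun _ => blank)
  let board := (PySem.List.enumerate hs 0).foldl (pvStepA H base) board0
  String.ofList (List.intercalate ['\n'] board)

-- ===== PORT B =====
-- B's per-cell rule: cell(r,c) of Source B, a pure lookup into the per-column tables
def pvCellB (row_ : List Int) (til_ : List Char) (n : Int) (r c : Int) : Char :=
  if c < n ∧ PySem.List.pyGetD row_ c 0 = r then PySem.List.pyGetD til_ c ' '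
  else if 1 ≤ c ∧ PySem.List.pyGetD row_ (c - 1) 0 = r + 2 then PySem.List.pyGetD til_ (c - 1) ' '
  else ' '

def draw_trail_alt (trail : List Int) : String :=
  let hs := pvAccum 0 trail
  let min_h := (PySem.List.min? hs (fun x => x)).getD 0
  let base := min_h - PySem.Int.mod min_h 3
  let H := PySem.Int.floordiv ((PySem.List.max? hs (fun x => x)).getD 0) 3
             - PySem.Int.floordiv min_h 3 + 3
  let n : Int := (hs.length : Int)
  let row_ := hs.map (fun h => H - 1 - PySem.Int.floordiv (h - base) 3)
  let til_ := hs.map (fun h => pvTile h)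
  let lines := (PySem.List.pyRange 0 H 1).map (fun r =>
      (PySem.List.pyRange 0 (n + 1) 1).map (fun c => pvCellB row_ til_ n r c))
  String.ofList (List.intercalate ['\n'] lines)

-- ===== PRECONDITION & SPEC =====
-- Pre_ excludes only the empty list, on which A's min(hs) raises ValueError (B raises there too).
def Pre_draw_trail (trail : List Int) : Prop := trail ≠ []
instance (trail : List Int) : Decidable (Pre_draw_trail trail) := by unfold Pre_draw_trail; infer_instance
def pvWitness_draw_trail : List Int := ([1, 2, -3])

def Spec_draw_trail (trail : List Int) (out : String) : Prop := out = draw_trail_alt trail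
instance (trail : List Int) (out : String) : Decidable (Spec_draw_trail trail out) := by unfold Spec_draw_trail; infer_instance

-- ===== CLAIM (what is proved, stated in full; the proofs are below) =====
def Claim_equal_draw_trail : Prop := ∀ (trail : List Int), Dom_draw_trail trail → Pre_draw_trail trail → Spec_draw_trail trail (draw_trail trail)

-- ===== LEMMAS AND PROOFS =====

-- the character A's board holds at (r, c)
def pvCell (board : List (List Char)) (r c : Int) : Char :=
  PySem.List.pyGetD (PySem.List.pyGetD board r []) c ' '

-- B's per-cell rule restricted to the first k columns' writes (proof-only gadget)
def pvF (hs : List Int) (H base k r c : Int) : Char :=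
  if c < k ∧ H - 1 - PySem.Int.floordiv (PySem.List.pyGetD hs c 0 - base) 3 = r then
    pvTile (PySem.List.pyGetD hs c 0)
  else if 1 ≤ c ∧ c ≤ k ∧
      H - 3 - PySem.Int.floordiv (PySem.List.pyGetD hs (c - 1) 0 - base) 3 = r then
    pvTile (PySem.List.pyGetD hs (c - 1) 0)
  else ' '

theorem pvAccum_length (cur : Int) (t : List Int) : (pvAccum cur t).length = t.length := by
  induction t generalizing cur with
  | nil => rfl
  | cons x xs ih => simp [pvAccum, ih]

theorem cell_stepA {W : Nat} (H base : Int) (board : List (List Char)) (p : Int × Int)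
    (hrows : ∀ row ∈ board, row.length = W)
    (hj : 0 ≤ p.1) (_hj2 : p.1 + 1 < (W : Int))
    (hi : 2 ≤ pvIdx H base p.2) (hi2 : pvIdx H base p.2 < (board.length : Int))
    (r c : Int) (hr : 0 ≤ r) (hr2 : r < (board.length : Int)) (hc : 0 ≤ c) (hc2 : c < (W : Int)) :
    pvCell (pvStepA H base board p) r c =
      if r = pvIdx H base p.2 - 2 ∧ c = p.1 + 1 then pvTile p.2
      else if r = pvIdx H base p.2 ∧ c = p.1 then pvTile p.2
      else pvCell board r c := by
  set i := pvIdx H base p.2 with hidef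
  set t := pvTile p.2 with htdef
  have hiN : i.toNat < board.length := by omega
  have hi2N : (i - 2).toNat < board.length := by omega
  have hrowsW : ∀ (n : Nat) (h : n < board.length), (board[n]).length = W :=
    fun n h => hrows _ (List.getElem_mem h)
  have hrN : r.toNat < board.length := by omega
  have hcN : c.toNat < W := by omega
  have hstep : pvStepA H base board p =
      (board.set i.toNat ((board[i.toNat]).set p.1.toNat t)).set (i-2).toNat
        ((board[(i-2).toNat]).set (p.1+1).toNat t) := by
    simp only [pvStepA, ← hidef, ← htdef]
    rw [PySem.List.pyGetD_eq_getElem board [] (by omega) (by omega),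
        PySem.List.pySetD_of_nonneg _ _ hj,
        PySem.List.pySetD_of_nonneg _ _ (by omega : (0:Int) ≤ i)]
    rw [PySem.List.pyGetD_eq_getElem _ [] (by omega)
          (by simpa using (by omega : (i:Int) - 2 < (board.length:Int)))]
    rw [List.getElem_set, if_neg (by omega : ¬ i.toNat = (i-2).toNat)]
    rw [PySem.List.pySetD_of_nonneg _ _ (by omega : (0:Int) ≤ p.1 + 1),
        PySem.List.pySetD_of_nonneg _ _ (by omega : (0:Int) ≤ i - 2)]
  have hrr : pvCell board r c = (board[r.toNat])[c.toNat]'(by rw [hrowsW r.toNat hrN]; omega) := by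
    unfold pvCell
    rw [PySem.List.pyGetD_eq_getElem board [] hr hr2,
        PySem.List.pyGetD_eq_getElem _ ' ' hc (by rw [hrowsW r.toNat hrN]; exact_mod_cast hc2)]
  rw [hstep, hrr]
  unfold pvCell
  rw [PySem.List.pyGetD_eq_getElem _ [] hr (by simpa using hr2)]
  rw [List.getElem_set]
  by_cases hra : r = i - 2
  · have e : (i - 2).toNat = r.toNat := by omega
    have hbe : board[(i-2).toNat]'hi2N = board[r.toNat]'hrN := by simp only [e]
    rw [if_pos e, hbe]
    rw [PySem.List.pyGetD_eq_getElem _ ' ' hc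
          (by simp only [List.length_set, hrowsW r.toNat hrN]; exact_mod_cast hc2)]
    rw [List.getElem_set]
    by_cases hcb : c = p.1 + 1
    · rw [if_pos (by omega), if_pos ⟨hra, hcb⟩]
    · rw [if_neg (by omega), if_neg (by rintro ⟨_, e2⟩; exact hcb e2),
          if_neg (by rintro ⟨e1, _⟩; omega)]
  · rw [if_neg (by omega), List.getElem_set]
    by_cases hrb : r = i
    · have e : i.toNat = r.toNat := by omega
      have hbe : board[i.toNat]'hiN = board[r.toNat]'hrN := by simp only [e]
      rw [if_pos e, hbe,
          PySem.List.pyGetD_eq_getElem _ ' ' hc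
            (by simp only [List.length_set, hrowsW r.toNat hrN]; exact_mod_cast hc2),
          List.getElem_set]
      by_cases hcb : c = p.1
      · rw [if_pos (by omega), if_neg (by rintro ⟨e1, _⟩; omega), if_pos ⟨hrb, hcb⟩]
      · rw [if_neg (by omega), if_neg (by rintro ⟨e1, _⟩; omega),
            if_neg (by rintro ⟨_, e2⟩; exact hcb e2)]
    · rw [if_neg (by omega), if_neg (by rintro ⟨e1, _⟩; omega),
          if_neg (by rintro ⟨e1, _⟩; omega),
          PySem.List.pyGetD_eq_getElem _ ' ' hc (by rw [hrowsW r.toNat hrN]; exact_mod_cast hc2)]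

theorem length_stepA (H base : Int) (board : List (List Char)) (p : Int × Int) :
    (pvStepA H base board p).length = board.length := by
  simp [pvStepA, PySem.List.length_pySetD]

theorem rows_stepA {W : Nat} (H base : Int) (board : List (List Char)) (p : Int × Int)
    (hrows : ∀ row ∈ board, row.length = W)
    (hj : 0 ≤ p.1) (_hj2 : p.1 + 1 < (W : Int))
    (hi : 2 ≤ pvIdx H base p.2) (hi2 : pvIdx H base p.2 < (board.length : Int)) :
    ∀ row ∈ pvStepA H base board p, row.length = W := by
  set i := pvIdx H base p.2 with hidef
  set t := pvTile p.2 with htdef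
  have hiN : i.toNat < board.length := by omega
  have hi2N : (i - 2).toNat < board.length := by omega
  have hstep : pvStepA H base board p =
      (board.set i.toNat ((board[i.toNat]).set p.1.toNat t)).set (i-2).toNat
        ((board[(i-2).toNat]).set (p.1+1).toNat t) := by
    simp only [pvStepA, ← hidef, ← htdef]
    rw [PySem.List.pyGetD_eq_getElem board [] (by omega) (by omega),
        PySem.List.pySetD_of_nonneg _ _ hj,
        PySem.List.pySetD_of_nonneg _ _ (by omega : (0:Int) ≤ i)]
    rw [PySem.List.pyGetD_eq_getElem _ [] (by omega)
          (by simpa using (by omega : (i:Int) - 2 < (board.length:Int)))]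
    rw [List.getElem_set, if_neg (by omega : ¬ i.toNat = (i-2).toNat)]
    rw [PySem.List.pySetD_of_nonneg _ _ (by omega : (0:Int) ≤ p.1 + 1),
        PySem.List.pySetD_of_nonneg _ _ (by omega : (0:Int) ≤ i - 2)]
  rw [hstep]
  intro row hrow
  rcases List.mem_or_eq_of_mem_set hrow with h | h
  · rcases List.mem_or_eq_of_mem_set h with h2 | h2
    · exact hrows _ h2
    · subst h2; rw [List.length_set]; exact hrows _ (List.getElem_mem hiN)
  · subst h; rw [List.length_set]; exact hrows _ (List.getElem_mem hi2N)

-- one column's pair of writes turns pvF k into pvF (k+1)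
theorem pvF_step (hs : List Int) (H base : Int) (k : Nat) (hk : k < hs.length)
    (r c : Int) (hc : 0 ≤ c) :
    (if r = pvIdx H base hs[k] - 2 ∧ c = (k : Int) + 1 then pvTile hs[k]
     else if r = pvIdx H base hs[k] ∧ c = (k : Int) then pvTile hs[k]
     else pvF hs H base (k : Int) r c) = pvF hs H base ((k : Int) + 1) r c := by
  have hg : PySem.List.pyGetD hs ((k : Int)) 0 = hs[k] := by
    rw [PySem.List.pyGetD_eq_getElem _ _ (by omega) (by exact_mod_cast hk)]
    simp
  by_cases hck : c = (k : Int)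
  · subst hck
    unfold pvF
    simp only [hg]
    set v := hs[k] with hv
    set f1 := PySem.Int.floordiv (v - base) 3 with hf1
    set w := PySem.List.pyGetD hs ((k : Int) - 1) 0 with hw
    set f2 := PySem.Int.floordiv (w - base) 3 with hf2
    have hb2 : pvIdx H base v = H - 1 - f1 := rfl
    set i := pvIdx H base v with hi
    clear_value i f2 w f1 v
    split_ifs <;> first | rfl | ((try simp only [and_true] at *); omega)
  · by_cases hck1 : c = (k : Int) + 1
    · subst hck1
      unfold pvF
      simp only [show (k : Int) + 1 - 1 = (k : Int) from by ring, hg]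
      set v := hs[k] with hv
      set f1 := PySem.Int.floordiv (v - base) 3 with hf1
      set u := PySem.List.pyGetD hs ((k : Int) + 1) 0 with hu
      set f3 := PySem.Int.floordiv (u - base) 3 with hf3
      have hb2 : pvIdx H base v = H - 1 - f1 := rfl
      set i := pvIdx H base v with hi
      clear_value i f3 u f1 v
      split_ifs <;> first | rfl | ((try simp only [and_true] at *); omega)
    · unfold pvF
      set v := hs[k] with hv
      set f1 := PySem.Int.floordiv (v - base) 3 with hf1
      set a1 := PySem.List.pyGetD hs c 0 with ha1
      set g1 := PySem.Int.floordiv (a1 - base) 3 with hg1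
      set a2 := PySem.List.pyGetD hs (c - 1) 0 with ha2
      set g2 := PySem.Int.floordiv (a2 - base) 3 with hg2
      have hb2 : pvIdx H base v = H - 1 - f1 := rfl
      set i := pvIdx H base v with hi
      clear_value i g2 a2 g1 a1 f1 v
      split_ifs <;> first | rfl | omega

-- invariant: folding A's writes for the first k columns realises pvF … k
theorem fold_gather {W : Nat} (hs : List Int) (H base : Int)
    (hW : (W : Int) = (hs.length : Int) + 1)
    (board0 : List (List Char))
    (hrows0 : ∀ row ∈ board0, row.length = W)
    (hcell0 : ∀ r c : Int, 0 ≤ r → r < (board0.length : Int) → 0 ≤ c → c < (W : Int) →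
        pvCell board0 r c = ' ')
    (hidx : ∀ h ∈ hs, 2 ≤ pvIdx H base h ∧ pvIdx H base h < (board0.length : Int)) :
    ∀ k : Nat, k ≤ hs.length →
      ((((PySem.List.enumerate hs 0).take k).foldl (pvStepA H base) board0).length = board0.length) ∧
      (∀ row ∈ ((PySem.List.enumerate hs 0).take k).foldl (pvStepA H base) board0, row.length = W) ∧
      (∀ r c : Int, 0 ≤ r → r < (board0.length : Int) → 0 ≤ c → c < (W : Int) →
        pvCell (((PySem.List.enumerate hs 0).take k).foldl (pvStepA H base) board0) r c =
          pvF hs H base (k : Int) r c) := by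
  intro k
  induction k with
  | zero =>
    intro _
    refine ⟨by simp, by simpa using hrows0, ?_⟩
    intro r c hr hr2 hcge hcl
    simp only [List.take_zero, List.foldl_nil]
    rw [hcell0 r c hr hr2 hcge hcl]
    unfold pvF
    rw [if_neg (by omega), if_neg (by omega)]
  | succ k ih =>
    intro hk1
    have hk : k < hs.length := by omega
    obtain ⟨ihlen, ihrows, ihcell⟩ := ih (by omega)
    have hkE : k < (PySem.List.enumerate hs 0).length := by
      rw [PySem.List.length_enumerate]; exact hk
    have htake : (PySem.List.enumerate hs 0).take (k + 1) =
        (PySem.List.enumerate hs 0).take k ++ [((k : Int), hs[k])] := by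
      rw [List.take_add_one, List.getElem?_eq_getElem hkE, PySem.List.getElem_enumerate]
      simp
    have hfold : ((PySem.List.enumerate hs 0).take (k+1)).foldl (pvStepA H base) board0 =
        pvStepA H base (((PySem.List.enumerate hs 0).take k).foldl (pvStepA H base) board0)
          ((k : Int), hs[k]) := by
      rw [htake, List.foldl_append, List.foldl_cons, List.foldl_nil]
    obtain ⟨hb1, hb2⟩ := hidx hs[k] (List.getElem_mem hk)
    have hlen := length_stepA H base
      (((PySem.List.enumerate hs 0).take k).foldl (pvStepA H base) board0) ((k : Int), hs[k])
    refine ⟨by rw [hfold, hlen, ihlen], ?_, ?_⟩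
    · rw [hfold]
      exact rows_stepA H base _ _ ihrows (by omega) (by push_cast; omega) hb1
        (by rw [show pvIdx H base (((k : Int), hs[k]) : Int × Int).2 = pvIdx H base hs[k] from rfl]; omega)
    · intro r c hr hr2 hcge hcl
      rw [hfold,
          cell_stepA H base _ ((k : Int), hs[k]) ihrows (by omega) (by push_cast; omega)
            hb1 (by rw [show pvIdx H base (((k : Int), hs[k]) : Int × Int).2 = pvIdx H base hs[k] from rfl]; omega)
            r c hr (by omega) hcge hcl]
      simp only []
      rw [ihcell r c hr hr2 hcge hcl]
      rw [pvF_step hs H base k hk r c hcge]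
      push_cast
      ring_nf

theorem idx_bounds (m M h : Int) (hm : m ≤ h) (hM : h ≤ M) :
    2 ≤ pvIdx (PySem.Int.floordiv M 3 - PySem.Int.floordiv m 3 + 3) (m - PySem.Int.mod m 3) h ∧
    pvIdx (PySem.Int.floordiv M 3 - PySem.Int.floordiv m 3 + 3) (m - PySem.Int.mod m 3) h <
      PySem.Int.floordiv M 3 - PySem.Int.floordiv m 3 + 3 := by
  unfold pvIdx
  have h1 := PySem.Int.floordiv_mul_add_mod m 3
  have h2 := PySem.Int.floordiv_mul_add_mod M 3
  have h3 := PySem.Int.mod_nonneg m (by norm_num : (0:Int) < 3)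
  have h4 := PySem.Int.mod_lt m (by norm_num : (0:Int) < 3)
  have h5 := PySem.Int.mod_nonneg M (by norm_num : (0:Int) < 3)
  have h6 := PySem.Int.mod_lt M (by norm_num : (0:Int) < 3)
  have h7 := PySem.Int.floordiv_mul_add_mod (h - (m - PySem.Int.mod m 3)) 3
  have h8 := PySem.Int.mod_nonneg (h - (m - PySem.Int.mod m 3)) (by norm_num : (0:Int) < 3)
  have h9 := PySem.Int.mod_lt (h - (m - PySem.Int.mod m 3)) (by norm_num : (0:Int) < 3)
  omega

-- the fully-folded rule agrees with B's per-cell lookup inside the picture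
theorem cellB_eq (hs : List Int) (H base r c : Int) (hc : 0 ≤ c)
    (hcl : c < (hs.length : Int) + 1) :
    pvCellB (hs.map (fun h => H - 1 - PySem.Int.floordiv (h - base) 3))
        (hs.map (fun h => pvTile h)) (hs.length : Int) r c =
      pvF hs H base (hs.length : Int) r c := by
  unfold pvCellB pvF
  by_cases h1c : 1 ≤ c
  · have hlb : 0 ≤ c - 1 := by omega
    have hub : c - 1 < (hs.length : Int) := by omega
    have hubN : (c - 1).toNat < hs.length := by omega
    have e3 : PySem.List.pyGetD (hs.map (fun h => H - 1 - PySem.Int.floordiv (h - base) 3))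
        (c - 1) 0 = H - 1 - PySem.Int.floordiv (PySem.List.pyGetD hs (c - 1) 0 - base) 3 := by
      rw [PySem.List.pyGetD_eq_getElem _ _ hlb (by simpa using hub),
          PySem.List.pyGetD_eq_getElem hs _ hlb hub, List.getElem_map]
    have e4 : PySem.List.pyGetD (hs.map (fun h => pvTile h)) (c - 1) ' ' =
        pvTile (PySem.List.pyGetD hs (c - 1) 0) := by
      rw [PySem.List.pyGetD_eq_getElem _ _ hlb (by simpa using hub),
          PySem.List.pyGetD_eq_getElem hs _ hlb hub, List.getElem_map]
    by_cases hcn : c < (hs.length : Int)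
    · have hcN : c.toNat < hs.length := by omega
      have e1 : PySem.List.pyGetD (hs.map (fun h => H - 1 - PySem.Int.floordiv (h - base) 3))
          c 0 = H - 1 - PySem.Int.floordiv (PySem.List.pyGetD hs c 0 - base) 3 := by
        rw [PySem.List.pyGetD_eq_getElem _ _ hc (by simpa using hcn),
            PySem.List.pyGetD_eq_getElem hs _ hc hcn, List.getElem_map]
      have e2 : PySem.List.pyGetD (hs.map (fun h => pvTile h)) c ' ' =
          pvTile (PySem.List.pyGetD hs c 0) := by
        rw [PySem.List.pyGetD_eq_getElem _ _ hc (by simpa using hcn),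
            PySem.List.pyGetD_eq_getElem hs _ hc hcn, List.getElem_map]
      rw [e3, e4, e1, e2]
      set a1 := PySem.List.pyGetD hs c 0 with ha1
      set g1 := PySem.Int.floordiv (a1 - base) 3 with hg1
      set a2 := PySem.List.pyGetD hs (c - 1) 0 with ha2
      set g2 := PySem.Int.floordiv (a2 - base) 3 with hg2
      clear_value g2 a2 g1 a1
      split_ifs <;> first | rfl | omega
    · rw [e3, e4]
      set a2 := PySem.List.pyGetD hs (c - 1) 0 with ha2
      set g2 := PySem.Int.floordiv (a2 - base) 3 with hg2
      clear_value g2 a2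
      split_ifs <;> first | rfl | omega
  · by_cases hcn : c < (hs.length : Int)
    · have e1 : PySem.List.pyGetD (hs.map (fun h => H - 1 - PySem.Int.floordiv (h - base) 3))
          c 0 = H - 1 - PySem.Int.floordiv (PySem.List.pyGetD hs c 0 - base) 3 := by
        rw [PySem.List.pyGetD_eq_getElem _ _ hc (by simpa using hcn),
            PySem.List.pyGetD_eq_getElem hs _ hc hcn, List.getElem_map]
      have e2 : PySem.List.pyGetD (hs.map (fun h => pvTile h)) c ' ' =
          pvTile (PySem.List.pyGetD hs c 0) := by
        rw [PySem.List.pyGetD_eq_getElem _ _ hc (by simpa using hcn),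
            PySem.List.pyGetD_eq_getElem hs _ hc hcn, List.getElem_map]
      rw [e1, e2]
      split_ifs <;> first | rfl | omega
    · split_ifs <;> first | rfl | omega

theorem draw_trail_spec : Claim_equal_draw_trail := by
  intro trail _ hpre
  unfold Spec_draw_trail
  simp only [draw_trail, draw_trail_alt]
  have hlenhs : (pvAccum 0 trail).length = trail.length := pvAccum_length 0 trail
  set hs := pvAccum 0 trail with hhsdef
  have hne : hs ≠ [] := by
    intro h
    exact hpre (List.length_eq_zero_iff.mp (by rw [← hlenhs, h]; rfl))
  obtain ⟨m, hm⟩ : ∃ m, PySem.List.min? hs (fun x => x) = some m := by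
    cases h : PySem.List.min? hs (fun x => x) with
    | none => exact absurd ((PySem.List.min?_eq_none_iff hs _).mp h) hne
    | some m => exact ⟨m, rfl⟩
  obtain ⟨M, hM⟩ : ∃ M, PySem.List.max? hs (fun x => x) = some M := by
    cases h : PySem.List.max? hs (fun x => x) with
    | none => exact absurd ((PySem.List.max?_eq_none_iff hs _).mp h) hne
    | some M => exact ⟨M, rfl⟩
  rw [hm, hM]
  simp only [Option.getD_some]
  set base := m - PySem.Int.mod m 3 with hbasedef
  set Hh := PySem.Int.floordiv M 3 - PySem.Int.floordiv m 3 + 3 with hHdef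
  set W : Nat := trail.length + 1 with hWdef
  have hmM : m ≤ M := by
    have hhd : hs.head hne ∈ hs := List.head_mem hne
    exact le_trans (PySem.List.min?_isMin hm _ hhd) (PySem.List.max?_isMax hM _ hhd)
  have hH3 : 3 ≤ Hh := by
    have h1 := PySem.Int.floordiv_mul_add_mod m 3
    have h2 := PySem.Int.floordiv_mul_add_mod M 3
    have h3 := PySem.Int.mod_nonneg m (by norm_num : (0:Int) < 3)
    have h4 := PySem.Int.mod_lt m (by norm_num : (0:Int) < 3)
    have h5 := PySem.Int.mod_nonneg M (by norm_num : (0:Int) < 3)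
    have h6 := PySem.Int.mod_lt M (by norm_num : (0:Int) < 3)
    omega
  set board0 := (PySem.List.pyRange 0 Hh 1).map
      (fun _ => List.replicate (trail.length + 1) ' ') with hb0def
  have hb0len : board0.length = Hh.toNat := by
    simp [hb0def, PySem.List.length_pyRange_one]
  have hb0lenI : (board0.length : Int) = Hh := by rw [hb0len]; omega
  have hb0rows : ∀ row ∈ board0, row.length = W := by
    intro row hrow
    rw [hb0def] at hrow
    obtain ⟨_, _, rfl⟩ := List.mem_map.mp hrow
    simp [hWdef]
  have hb0cell : ∀ r c : Int, 0 ≤ r → r < (board0.length : Int) → 0 ≤ c → c < (W : Int) →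
      pvCell board0 r c = ' ' := by
    intro r c hr hr2 hc hc2
    unfold pvCell
    rw [PySem.List.pyGetD_eq_getElem _ [] hr hr2]
    simp only [hb0def, List.getElem_map]
    rw [PySem.List.pyGetD_eq_getElem _ ' ' hc (by simp [hWdef] at hc2 ⊢; omega)]
    simp
  have hidx : ∀ h ∈ hs, 2 ≤ pvIdx Hh base h ∧ pvIdx Hh base h < (board0.length : Int) := by
    intro h hmem
    have hb := idx_bounds m M h (PySem.List.min?_isMin hm _ hmem) (PySem.List.max?_isMax hM _ hmem)
    rw [← hbasedef, ← hHdef] at hb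
    exact ⟨hb.1, by rw [hb0lenI]; exact hb.2⟩
  have hWI : ((W : Nat) : Int) = (hs.length : Int) + 1 := by
    rw [hlenhs]; push_cast [hWdef]; ring
  obtain ⟨hfl, hfr, hfc⟩ :=
    (fold_gather hs Hh base hWI board0 hb0rows hb0cell hidx) hs.length (le_refl _)
  have htakeall : (PySem.List.enumerate hs 0).take hs.length = PySem.List.enumerate hs 0 := by
    apply List.take_of_length_le
    rw [PySem.List.length_enumerate]
  rw [htakeall] at hfl hfr hfc
  refine congrArg _ (congrArg _ ?_)
  set B' := (PySem.List.enumerate hs 0).foldl (pvStepA Hh base) board0 with hB'def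
  have hBlen : B'.length = Hh.toNat := by rw [hB'def, hfl, hb0len]
  apply List.ext_getElem
  · simp [hBlen, PySem.List.length_pyRange_one]
  · intro n h1 h2
    rw [List.getElem_map, PySem.List.getElem_pyRange_one]
    have hrowW : (B'[n]).length = W := hfr _ (List.getElem_mem h1)
    apply List.ext_getElem
    · simp only [hrowW, List.length_map, PySem.List.length_pyRange_one]
      omega
    · intro k k1 k2
      rw [List.getElem_map, PySem.List.getElem_pyRange_one]
      have hnH : (n : Int) < (board0.length : Int) := by
        rw [hb0lenI]; rw [hBlen] at h1; omega
      have hkW : (k : Int) < (W : Int) := by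
        rw [hrowW] at k1; exact_mod_cast k1
      have hcall := hfc (n : Int) (k : Int) (by positivity) hnH (by positivity) hkW
      unfold pvCell at hcall
      rw [PySem.List.pyGetD_eq_getElem _ [] (by positivity)
            (by exact_mod_cast h1)] at hcall
      rw [PySem.List.pyGetD_eq_getElem _ ' ' (by positivity)
            (by simp [hrowW]; exact_mod_cast hkW)] at hcall
      simp only [Int.toNat_natCast] at hcall
      simp only [zero_add]
      rw [cellB_eq hs Hh base (n : Int) (k : Int) (by positivity) (by omega)]
      exact hcall
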